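-- pv_equiv track=rewrite | github.com/iliazlobin/leetcode | exercises/l1-sushi.py | getMaximumEatenDishCount
-- ===== SOURCE A (Python) =====
-- from collections import Counter, deque
-- from typing import List, Optional
--
-- def getMaximumEatenDishCount(N: int, D: List[int], K: int) -> int:
--     res = 0
--     consumed = {}
--     queue = deque()
--
--     for right in range(N):
--         curr = D[right]
--         if curr not in consumed:
--             consumed[curr] = True
--             res += 1
--             queue.append(curr)
--
--         if len(queue) > K:
--             oldDish = queue.popleft()
--             del consumed[oldDish]
--
--     return res
-- ===== SOURCE B (Python) =====
-- def getMaximumEatenDishCount(N, D, K):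
--     lastEaten = {}
--     e = 0
--     for i, dish in enumerate(D):
--         if i >= N:
--             break
--         if dish not in lastEaten or lastEaten[dish] <= e - K:
--             e += 1
--             lastEaten[dish] = e
--     return e
-- ===== Notes on version B (the rewrite author's own statement) =====
-- stated objective: simpler
-- what changed: Replaced the deque+dict sliding window (with its eviction/popleft branch) by a single dict of last-eaten order indices plus an eaten counter: a dish is eaten iff unseen or lastEaten[dish] <= e - K, with no eviction step at all.
import Mathlib
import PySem

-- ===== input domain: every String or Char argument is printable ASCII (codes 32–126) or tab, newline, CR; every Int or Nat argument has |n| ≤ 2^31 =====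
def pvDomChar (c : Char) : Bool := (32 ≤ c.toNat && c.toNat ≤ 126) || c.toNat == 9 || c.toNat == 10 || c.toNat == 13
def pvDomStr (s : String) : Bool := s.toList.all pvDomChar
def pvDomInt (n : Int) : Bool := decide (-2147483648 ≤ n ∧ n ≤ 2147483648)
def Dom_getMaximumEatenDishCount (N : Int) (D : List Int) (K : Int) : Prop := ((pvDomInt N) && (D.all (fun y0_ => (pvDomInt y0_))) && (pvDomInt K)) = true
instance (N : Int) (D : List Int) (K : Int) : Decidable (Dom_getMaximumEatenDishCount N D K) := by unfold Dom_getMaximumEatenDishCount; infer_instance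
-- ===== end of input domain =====

-- B replaces A's deque+dict sliding window by one dict of last-eaten order indices plus an
-- eaten counter, with no eviction step; objective: simpler. Proved equal wherever A returns.

-- ===== PORT A =====
-- one iteration of A's for-body: state = (res, consumed, queue)
def getMaximumEatenDishCountStep (K : Int) (s : Int × PySem.Dict Int Bool × List Int)
    (curr : Int) : Int × PySem.Dict Int Bool × List Int :=
  let s1 := if s.2.1.get? curr = none
            then (s.1 + 1, s.2.1.insert curr true, s.2.2 ++ [curr]) else s
  if ((s1.2.2.length : Int)) > K then
    match s1.2.2 with
    | [] => s1            -- deque.popleft() on empty would raise; unreachable (queue nonempty when this branch fires)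
    | oldDish :: rest => (s1.1, s1.2.1.erase oldDish, rest)
  else s1

def getMaximumEatenDishCount (N : Int) (D : List Int) (K : Int) : Int :=
  -- curr = D[right]: in range for every right in range(N) under Pre_ (N ≤ len D)
  ((PySem.List.pyRange 0 N 1).foldl
    (fun s right => getMaximumEatenDishCountStep K s (PySem.List.pyGetD D right 0))
    (0, PySem.Dict.empty, [])).1

-- ===== PORT B =====
-- one iteration of B's for-body: state = (e, lastEaten)
def getMaximumEatenDishCountAltStep (K : Int) (s : Int × PySem.Dict Int Int)
    (dish : Int) : Int × PySem.Dict Int Int :=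
  match s.2.get? dish with
  | none => (s.1 + 1, s.2.insert dish (s.1 + 1))
  | some j => if j ≤ s.1 - K then (s.1 + 1, s.2.insert dish (s.1 + 1)) else s

-- B's loop over enumerate(D) with the break at i >= N
def getMaximumEatenDishCountAltLoop (N K : Int) : List (Int × Int) → Int → PySem.Dict Int Int → Int
  | [], e, _ => e
  | (i, dish) :: rest, e, last =>
    if N ≤ i then e
    else
      match getMaximumEatenDishCountAltStep K (e, last) dish with
      | (e', last') => getMaximumEatenDishCountAltLoop N K rest e' last'

def getMaximumEatenDishCount_alt (N : Int) (D : List Int) (K : Int) : Int :=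
  getMaximumEatenDishCountAltLoop N K (PySem.List.enumerate D 0) 0 PySem.Dict.empty

-- ===== PRECONDITION & SPEC =====
-- Pre_ excludes exactly the inputs where A raises: D[right] is an IndexError when N > len(D).
def Pre_getMaximumEatenDishCount (N : Int) (D : List Int) (K : Int) : Prop :=
  N ≤ (D.length : Int)
instance (N : Int) (D : List Int) (K : Int) : Decidable (Pre_getMaximumEatenDishCount N D K) := by
  unfold Pre_getMaximumEatenDishCount; infer_instance

def pvWitness_getMaximumEatenDishCount : Int × List Int × Int := (3, [1, 2, 1], 2)

def Spec_getMaximumEatenDishCount (N : Int) (D : List Int) (K : Int) (out : Int) : Prop := out = getMaximumEatenDishCount_alt N D K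
instance (N : Int) (D : List Int) (K : Int) (out : Int) : Decidable (Spec_getMaximumEatenDishCount N D K out) := by unfold Spec_getMaximumEatenDishCount; infer_instance

-- ===== CLAIM (what is proved, stated in full; the proofs are below) =====
def Claim_equal_getMaximumEatenDishCount : Prop := ∀ (N : Int) (D : List Int) (K : Int), Dom_getMaximumEatenDishCount N D K → Pre_getMaximumEatenDishCount N D K → Spec_getMaximumEatenDishCount N D K (getMaximumEatenDishCount N D K)

-- ===== LEMMAS AND PROOFS =====

theorem pvFindFilter {ν : Type} (k k' : Int) : ∀ (l : List (Int × ν)),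
    (l.filter (fun p => !(p.1 == k))).find? (fun p => p.1 == k') =
      if k' = k then none else l.find? (fun p => p.1 == k')
  | [] => by simp
  | p :: rest => by
    by_cases h1 : p.1 = k <;> by_cases h2 : p.1 = k'
    · have h3 : k' = k := by omega
      simp [List.filter_cons, h1, h3, pvFindFilter k k' rest]
    · have h3 : ¬ k' = k := by omega
      have h4 : (k == k') = false := beq_eq_false_iff_ne.mpr (by omega)
      simp [List.filter_cons, List.find?_cons, h1, h3, h4, pvFindFilter k k' rest]
    · have h3 : ¬ k' = k := by omega
      simp [List.filter_cons, List.find?_cons, h2, h3]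
    · simp [List.filter_cons, List.find?_cons, h1, h2, pvFindFilter k k' rest]

theorem pvDictGetErase {ν : Type} (d : PySem.Dict Int ν) (k k' : Int) :
    (d.erase k).get? k' = if k' = k then none else d.get? k' := by
  rcases d with ⟨items⟩
  show Option.map _ ((items.filter (fun p => !(p.1 == k))).find? (fun p => p.1 == k')) = _
  rw [pvFindFilter]
  by_cases h : k' = k <;> simp [h, PySem.Dict.get?]


-- the window invariant relating A's (res, consumed, queue) to B's (e, lastEaten):
-- res = e is carried implicitly (both folds share the counter as first component);
-- queue holds the dishes whose last-eaten order index lies in (e - min e (max K 0), e],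
-- in increasing order of that index; consumed is the set of queue members; every entry
-- of lastEaten has index in [1, e] and is live (in queue) iff its index exceeds e - K.
def pvInv (K e : Int) (last : PySem.Dict Int Int) (consumed : PySem.Dict Int Bool)
    (queue : List Int) : Prop :=
  0 ≤ e ∧
  queue.map (fun x => ((last.get? x).getD 0)) =
    PySem.List.pyRange (e - min e (max K 0) + 1) (e + 1) 1 ∧
  (∀ d : Int, (consumed.get? d).isSome ↔ d ∈ queue) ∧
  (∀ d j : Int, last.get? d = some j → 1 ≤ j ∧ j ≤ e ∧ (e - K < j ↔ d ∈ queue))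

theorem pvMapInsertNotMem (last : PySem.Dict Int Int) (curr v : Int) (l : List Int)
    (h : curr ∉ l) :
    l.map (fun x => (((last.insert curr v).get? x)).getD 0) =
      l.map (fun x => ((last.get? x).getD 0)) := by
  apply List.map_congr_left
  intro x hx
  rw [PySem.Dict.get?_insert_of_ne]
  intro hxe; exact h (hxe ▸ hx)

theorem pvStep (K e : Int) (last : PySem.Dict Int Int) (consumed : PySem.Dict Int Bool)
    (queue : List Int) (curr : Int) (hI : pvInv K e last consumed queue) :
    (getMaximumEatenDishCountStep K (e, consumed, queue) curr).1
        = (getMaximumEatenDishCountAltStep K (e, last) curr).1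
      ∧ pvInv K (getMaximumEatenDishCountAltStep K (e, last) curr).1
          (getMaximumEatenDishCountAltStep K (e, last) curr).2
          (getMaximumEatenDishCountStep K (e, consumed, queue) curr).2.1
          (getMaximumEatenDishCountStep K (e, consumed, queue) curr).2.2 := by
  obtain ⟨he, hmap, hcons, hlast⟩ := hI
  have hlen : (queue.length : Int) = min e (max K 0) := by
    have h := congrArg List.length hmap
    rw [List.length_map, PySem.List.length_pyRange_one] at h
    omega
  have hmemSome : ∀ d ∈ queue, ∃ j, last.get? d = some j ∧
      e - min e (max K 0) + 1 ≤ j ∧ j < e + 1 := by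
    intro d hd
    have hv : ((last.get? d).getD 0) ∈
        PySem.List.pyRange (e - min e (max K 0) + 1) (e + 1) 1 := by
      rw [← hmap]; exact List.mem_map_of_mem hd
    rw [PySem.List.mem_pyRange_one] at hv
    cases hg : last.get? d with
    | none =>
      rw [hg] at hv
      simp only [Option.getD_none] at hv
      exact absurd hv.1 (by omega)
    | some j =>
      rw [hg] at hv
      simp only [Option.getD_some] at hv
      exact ⟨j, rfl, by omega, by omega⟩
  by_cases hc : consumed.get? curr = none
  · -- eat branch: curr not in consumed / not live in lastEaten
    have hnm : curr ∉ queue := by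
      intro h
      have := (hcons curr).2 h
      rw [hc] at this; simp at this
    have hbv : getMaximumEatenDishCountAltStep K (e, last) curr
        = (e + 1, last.insert curr (e + 1)) := by
      unfold getMaximumEatenDishCountAltStep
      cases hg : last.get? curr with
      | none => rfl
      | some j =>
        have hj := hlast curr j hg
        have hle : j ≤ e - K := by
          rcases hj with ⟨_, _, hiff⟩
          by_contra hlt
          exact hnm (hiff.1 (by omega))
        simp [hle]
    have has1 : getMaximumEatenDishCountStep K (e, consumed, queue) curr
        = (if (((queue ++ [curr]).length : Int)) > K then
            match queue ++ [curr] with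
            | [] => (e + 1, consumed.insert curr true, queue ++ [curr])
            | oldDish :: rest => (e + 1, (consumed.insert curr true).erase oldDish, rest)
          else (e + 1, consumed.insert curr true, queue ++ [curr])) := by
      simp [getMaximumEatenDishCountStep, hc]
    have hlen1 : (((queue ++ [curr]).length : Int)) = min e (max K 0) + 1 := by
      simp; omega
    by_cases hpop : min e (max K 0) + 1 > K
    · -- eviction fires
      rw [hbv, has1, if_pos (by omega : (((queue ++ [curr]).length : Int)) > K)]
      cases hq : queue with
      | nil =>
        -- K ≤ 0: the freshly eaten dish is evicted at once
        have hw0 : min e (max K 0) = 0 := by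
          rw [hq] at hlen; simpa using hlen.symm
        have hK0 : K ≤ 0 := by omega
        subst hq
        refine ⟨rfl, by omega, ?_, ?_, ?_⟩
        · simp only [List.nil_append, List.map_nil]
          rw [show min (e + 1) (max K 0) = 0 by omega]
          rw [PySem.List.pyRange_one_eq_nil (by omega)]
        · intro d
          simp only [List.nil_append]
          rw [pvDictGetErase]
          by_cases hd : d = curr
          · simp [hd]
          · rw [if_neg hd, PySem.Dict.get?_insert, if_neg hd]
            simpa using (hcons d)
        · intro d j hg
          rw [PySem.Dict.get?_insert] at hg
          by_cases hd : d = curr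
          · rw [if_pos hd] at hg
            injection hg with hj
            simp only [List.nil_append, List.not_mem_nil]
            constructor
            · omega
            · constructor
              · omega
              · exact iff_of_false (by omega) (by simp)
          · rw [if_neg hd] at hg
            have hold := hlast d j hg
            refine ⟨hold.1, by omega, ?_⟩
            have : ¬ (e - K < j) := by
              intro h; exact (by simpa using hold.2.2.1 h)
            exact iff_of_false (by omega) (by simp)
      | cons o tl =>
        -- the window is full (min e (max K 0) = K ≥ 1): evict the oldest dish o
        subst hq
        have hlentl : (tl.length : Int) + 1 = min e (max K 0) := by
          simpa using hlen
        have hwK : min e (max K 0) = K := by omega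
        have hKe : K ≤ e ∧ 1 ≤ K := by omega
        rw [PySem.List.pyRange_one_cons (by omega :
          e - min e (max K 0) + 1 < e + 1)] at hmap
        simp only [List.map_cons, List.cons.injEq] at hmap
        obtain ⟨hhead, htl⟩ := hmap
        have hgo : last.get? o = some (e - K + 1) := by
          cases hg : last.get? o with
          | none =>
            rw [hg] at hhead; simp at hhead
            exact absurd hhead (by omega)
          | some j =>
            rw [hg] at hhead; simp at hhead
            exact congrArg some (by omega)
        have hcurrtl : curr ∉ tl := by
          intro h; exact hnm (List.mem_cons_of_mem o h)
        have hocurr : o ≠ curr := by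
          intro h; apply hnm; rw [h]; simp
        have hotl : o ∉ tl := by
          intro h
          have hv : ((last.get? o).getD 0) ∈
              PySem.List.pyRange (e - min e (max K 0) + 1 + 1) (e + 1) 1 := by
            rw [← htl]; exact List.mem_map_of_mem h
          rw [PySem.List.mem_pyRange_one] at hv
          rw [hgo] at hv; simp at hv; omega
        simp only [List.cons_append]
        refine ⟨trivial, by omega, ?_, ?_, ?_⟩
        · -- queue map: shift the window right by one
          rw [List.map_append, pvMapInsertNotMem last curr (e + 1) tl hcurrtl, htl]
          simp only [List.map_cons, List.map_nil, PySem.Dict.get?_insert_self,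
            Option.getD_some]
          rw [show min (e + 1) (max K 0) = K by omega]
          rw [show e + 1 - K + 1 = e - min e (max K 0) + 1 + 1 by omega]
          exact (PySem.List.pyRange_one_succ_right (by omega)).symm
        · intro d
          rw [pvDictGetErase]
          by_cases hd : d = o
          · rw [if_pos hd]
            subst hd
            simp [hotl, hocurr]
          · rw [if_neg hd, PySem.Dict.get?_insert]
            by_cases hdc : d = curr
            · simp [hdc]
            · rw [if_neg hdc]
              have := hcons d
              simp only [List.mem_cons] at this
              simp only [List.mem_append, List.mem_cons, List.not_mem_nil]
              constructor
              · intro hs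
                rcases this.1 hs with h | h
                · exact absurd h hd
                · exact Or.inl h
              · intro hs
                apply this.2
                rcases hs with h | h
                · exact Or.inr h
                · simp at h; exact absurd h hdc
        · intro d j hg
          rw [PySem.Dict.get?_insert] at hg
          by_cases hd : d = curr
          · rw [if_pos hd] at hg
            injection hg with hj
            subst hd
            refine ⟨by omega, by omega, iff_of_true (by omega) ?_⟩
            simp
          · rw [if_neg hd] at hg
            have hold := hlast d j hg
            refine ⟨hold.1, by omega, ?_⟩
            by_cases hdo : d = o
            · subst hdo
              rw [hgo] at hg
              injection hg with hj
              exact iff_of_false (by omega) (by simp [hotl, hocurr])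
            · by_cases hdtl : d ∈ tl
              · have hv : ((last.get? d).getD 0) ∈
                    PySem.List.pyRange (e - min e (max K 0) + 1 + 1) (e + 1) 1 := by
                  rw [← htl]; exact List.mem_map_of_mem hdtl
                rw [PySem.List.mem_pyRange_one, hg] at hv
                simp at hv
                exact iff_of_true (by omega) (by simp [hdtl])
              · have hdq : d ∉ o :: tl := by
                  simp [hdo, hdtl]
                have : ¬ (e - K < j) := fun h => hdq (hold.2.2.1 h)
                exact iff_of_false (by omega) (by simp [hdtl, hd])
    · -- no eviction: the window is not yet full (e = min e (max K 0) < K)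
      have hwe : min e (max K 0) = e := by omega
      have heK : e < K := by omega
      rw [hbv, has1, if_neg (by omega : ¬ ((((queue ++ [curr]).length : Int)) > K))]
      refine ⟨rfl, by omega, ?_, ?_, ?_⟩
      · rw [List.map_append, pvMapInsertNotMem last curr (e + 1) queue hnm, hmap]
        simp only [List.map_cons, List.map_nil, PySem.Dict.get?_insert_self,
          Option.getD_some]
        rw [show min (e + 1) (max K 0) = e + 1 by omega]
        rw [show e - min e (max K 0) + 1 = e + 1 - (e + 1) + 1 by omega]
        exact (PySem.List.pyRange_one_succ_right (by omega)).symm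
      · intro d
        rw [PySem.Dict.get?_insert]
        by_cases hd : d = curr
        · simp [hd]
        · rw [if_neg hd]
          simp only [List.mem_append, List.mem_cons, List.not_mem_nil, or_false]
          constructor
          · intro hs; exact Or.inl ((hcons d).1 hs)
          · intro hs
            apply (hcons d).2
            rcases hs with h | h
            · exact h
            · exact absurd h hd
      · intro d j hg
        rw [PySem.Dict.get?_insert] at hg
        by_cases hd : d = curr
        · rw [if_pos hd] at hg
          injection hg with hj
          subst hd
          refine ⟨by omega, by omega, iff_of_true (by omega) (by simp)⟩
        · rw [if_neg hd] at hg
          have hold := hlast d j hg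
          refine ⟨hold.1, by omega, ?_⟩
          have hdq : d ∈ queue := hold.2.2.1 (by omega)
          exact iff_of_true (by omega) (by simp [hdq])
  · -- skip branch: curr is in consumed, i.e. live in the window; nothing changes
    have hmem : curr ∈ queue := by
      apply (hcons curr).1
      cases h : consumed.get? curr with
      | none => exact absurd h hc
      | some b => simp
    obtain ⟨j, hj, hjlo, hjhi⟩ := hmemSome curr hmem
    have hlive : e - K < j := (hlast curr j hj).2.2.2 hmem
    have hq1 : 1 ≤ (queue.length : Int) := by
      cases queue with
      | nil => exact absurd hmem (by simp)
      | cons a b => simp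
    have hnolen : ¬ ((queue.length : Int) > K) := by omega
    have ha : getMaximumEatenDishCountStep K (e, consumed, queue) curr
        = (e, consumed, queue) := by
      simp [getMaximumEatenDishCountStep, hc, hnolen]
    have hb : getMaximumEatenDishCountAltStep K (e, last) curr = (e, last) := by
      simp [getMaximumEatenDishCountAltStep, hj, show ¬ (j ≤ e - K) by omega]
    rw [ha, hb]
    exact ⟨rfl, he, hmap, hcons, hlast⟩

theorem pvFold (K : Int) : ∀ (T : List Int) (e : Int) (last : PySem.Dict Int Int)
    (consumed : PySem.Dict Int Bool) (queue : List Int),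
    pvInv K e last consumed queue →
    (T.foldl (getMaximumEatenDishCountStep K) (e, consumed, queue)).1
      = (T.foldl (getMaximumEatenDishCountAltStep K) (e, last)).1
  | [], e, last, consumed, queue, _ => rfl
  | x :: rest, e, last, consumed, queue, hI => by
    obtain ⟨h1, h2⟩ := pvStep K e last consumed queue x hI
    simp only [List.foldl_cons]
    rcases ha : getMaximumEatenDishCountStep K (e, consumed, queue) x with ⟨r, c, q⟩
    rcases hb : getMaximumEatenDishCountAltStep K (e, last) x with ⟨e', l'⟩
    rw [ha, hb] at h1 h2
    simp only at h1 h2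
    rw [show r = e' from h1]
    exact pvFold K rest e' l' c q h2

theorem pvInv0 (K : Int) : pvInv K 0 PySem.Dict.empty PySem.Dict.empty [] := by
  refine ⟨le_refl 0, ?_, ?_, ?_⟩
  · simp only [List.map_nil]
    rw [PySem.List.pyRange_one_eq_nil (by omega)]
  · intro d; simp [PySem.Dict.get?_empty]
  · intro d j hg; simp [PySem.Dict.get?_empty] at hg

theorem pvAltLoop (N K : Int) : ∀ (ds : List Int) (s e : Int) (last : PySem.Dict Int Int),
    getMaximumEatenDishCountAltLoop N K (PySem.List.enumerate ds s) e last
      = ((ds.take ((N - s).toNat)).foldl (getMaximumEatenDishCountAltStep K) (e, last)).1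
  | [], s, e, last => by simp [PySem.List.enumerate, getMaximumEatenDishCountAltLoop]
  | d :: rest, s, e, last => by
    rw [PySem.List.enumerate_cons]
    by_cases hs : N ≤ s
    · rw [show ((N - s).toNat) = 0 by omega]
      simp [getMaximumEatenDishCountAltLoop, hs]
    · rw [show ((N - s).toNat) = ((N - (s + 1)).toNat) + 1 by omega]
      simp only [List.take_succ_cons, List.foldl_cons]
      unfold getMaximumEatenDishCountAltLoop
      rw [if_neg hs]
      rcases hb : getMaximumEatenDishCountAltStep K (e, last) d with ⟨e', l'⟩
      exact pvAltLoop N K rest (s + 1) e' l'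

theorem pvAFold (K N : Int) (D : List Int) (h0 : 0 ≤ N) (h1 : N ≤ (D.length : Int))
    (init : Int × PySem.Dict Int Bool × List Int) :
    (PySem.List.pyRange 0 N 1).foldl
        (fun s r => getMaximumEatenDishCountStep K s (PySem.List.pyGetD D r 0)) init
      = ((D.take N.toNat).foldl (getMaximumEatenDishCountStep K) init) := by
  rw [← List.foldl_map (f := fun r => PySem.List.pyGetD D r 0)
    (g := getMaximumEatenDishCountStep K)]
  congr 1
  have hTlen : (((D.take N.toNat).length : Int)) = N := by simp; omega
  have hmain := PySem.List.map_pyGetD_pyRange_zero' (D.take N.toNat) 0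
  rw [hTlen] at hmain
  rw [← hmain]
  apply List.map_congr_left
  intro r hr
  rw [PySem.List.mem_pyRange_one] at hr
  rw [PySem.List.pyGetD_eq_getElem D 0 (by omega) (by omega),
    PySem.List.pyGetD_eq_getElem (D.take N.toNat) 0 (by omega) (by rw [hTlen]; omega),
    List.getElem_take]

-- ===== VERDICT (by name: the statement is the Claim_ definition above) =====
theorem getMaximumEatenDishCount_spec : Claim_equal_getMaximumEatenDishCount := by
  intro N D K _ hPre
  unfold Spec_getMaximumEatenDishCount getMaximumEatenDishCount getMaximumEatenDishCount_alt
  rw [pvAltLoop]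
  rw [show N - 0 = N by ring]
  by_cases hN : 0 ≤ N
  · rw [pvAFold K N D hN hPre]
    exact pvFold K (D.take N.toNat) 0 PySem.Dict.empty PySem.Dict.empty [] (pvInv0 K)
  · rw [PySem.List.pyRange_one_eq_nil (by omega), show N.toNat = 0 by omega]
    rfl
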